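-- pv_equiv track=rewrite | github.com/hscspring/The-DataStructure-and-Algorithms | LeetCode/30-Substring-with-Concatenation-of-All-Words/substring_with_concatenation_of_all_words.py | words2str
-- ===== SOURCE A (Python) =====
-- def words2str(words: list):
--     res = set()
--     def func(prefix: list, suffix: list):
--         if not suffix:
--             line = "".join(prefix)
--             res.add(line)
--         for i in range(len(suffix)):
--             func(prefix + [suffix[i]], suffix[:i] + suffix[i+1:])
--     func([], words)
--     return res
-- ===== SOURCE B (Python) =====
-- def words2str(words: list):
--     # Pure compositional recursion: return the list of all concatenations of
--     # permutations of ws (in choice order), then deduplicate once at the end.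
--     def all_concats(ws):
--         if not ws:
--             return [""]
--         return [w + tail
--                 for i, w in enumerate(ws)
--                 for tail in all_concats(ws[:i] + ws[i + 1:])]
--     return set(all_concats(words))
-- ===== Notes on version B (the rewrite author's own statement) =====
-- stated objective: alternative
-- what changed: Replaces A's backtracking that threads a prefix accumulator and a mutable result set through the recursion with a pure compositional recursion returning the list of all permutation concatenations (strings built back-to-front as the recursion returns), deduplicated once into a set at the end.
import Mathlib
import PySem

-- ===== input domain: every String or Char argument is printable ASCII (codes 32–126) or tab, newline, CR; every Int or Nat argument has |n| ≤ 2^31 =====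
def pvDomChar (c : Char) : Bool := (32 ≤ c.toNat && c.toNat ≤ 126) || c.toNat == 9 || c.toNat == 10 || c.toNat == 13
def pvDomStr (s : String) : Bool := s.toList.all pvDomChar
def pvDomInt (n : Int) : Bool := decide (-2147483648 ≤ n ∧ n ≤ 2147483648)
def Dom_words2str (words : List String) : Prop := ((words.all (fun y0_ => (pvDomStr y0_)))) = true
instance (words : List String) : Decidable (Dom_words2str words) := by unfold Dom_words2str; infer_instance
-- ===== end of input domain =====

-- B replaces A's mutable-set backtracking (prefix accumulator threaded through recursion)
-- with a pure compositional recursion that returns the list of all permutation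
-- concatenations and deduplicates once at the end; objective: alternative decomposition.

-- ===== PORT A =====
-- inner 'func(prefix, suffix)': threads the set 'res' through the recursion
def words2strFunc (res : PySem.Set String) (pre : List String) (suffix : List String) :
    PySem.Set String :=
  (List.range suffix.length).attach.foldl
    (fun r i =>
      words2strFunc r (pre ++ [PySem.List.pyGetD suffix (i.1 : Int) ""])
        (PySem.List.slice suffix none (some (i.1 : Int)) ++
          PySem.List.slice suffix (some ((i.1 : Int) + 1)) none))
    (if suffix = [] then PySem.Set.add res (PySem.Str.join "" pre) else res)
termination_by suffix.length
decreasing_by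
  have hi := List.mem_range.mp i.2
  have h1 : ((i.1 : Int) + 1) = ((i.1 + 1 : Nat) : Int) := by push_cast; ring
  rw [h1, PySem.List.slice_to_natCast, PySem.List.slice_from_natCast]
  simp only [List.length_append, List.length_take, List.length_drop]
  omega

def words2str (words : List String) : List String :=
  words2strFunc PySem.Set.empty [] words

-- ===== PORT B =====
-- 'all_concats(ws)': the list of "".joins of all permutations of ws, built back-to-front
def allConcats (ws : List String) : List String :=
  if ws = [] then [""]
  else
    (PySem.List.enumerate ws).attach.flatMap
      (fun p =>
        (allConcats (PySem.List.slice ws none (some p.1.1) ++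
            PySem.List.slice ws (some (p.1.1 + 1)) none)).map
          (fun tail => p.1.2 ++ tail))
termination_by ws.length
decreasing_by
  have h1 : p.1.1 ∈ (PySem.List.enumerate ws 0).map (·.1) := List.mem_map_of_mem p.2
  rw [PySem.List.map_fst_enumerate] at h1
  have h2 := (PySem.List.mem_pyRange_one.mp (by simpa using h1))
  obtain ⟨k, hk⟩ : ∃ k : Nat, p.1.1 = (k : Int) := ⟨p.1.1.toNat, (Int.toNat_of_nonneg h2.1).symm⟩
  have h3 : ((k : Int) + 1) = ((k + 1 : Nat) : Int) := by push_cast; ring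
  rw [hk, h3, PySem.List.slice_to_natCast, PySem.List.slice_from_natCast]
  simp only [List.length_append, List.length_take, List.length_drop]
  omega

def words2str_alt (words : List String) : List String :=
  PySem.Set.ofList (allConcats words)

-- ===== PRECONDITION & SPEC =====
def Spec_words2str (words : List String) (out : List String) : Prop := out = words2str_alt words
instance (words : List String) (out : List String) : Decidable (Spec_words2str words out) := by unfold Spec_words2str; infer_instance

-- ===== CLAIM (what is proved, stated in full; the proofs are below) =====
def Claim_equal_words2str : Prop := ∀ (words : List String), Dom_words2str words → Spec_words2str words (words2str words)

-- ===== LEMMAS AND PROOFS =====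

lemma chars_join_nil_eq_flatten (ls : List (List Char)) :
    PySem.Chars.join [] ls = ls.flatten := by
  induction ls with
  | nil => rfl
  | cons a t ih =>
    cases t with
    | nil => simp [PySem.Chars.join, List.intercalate, List.intersperse]
    | cons b u =>
      simp only [PySem.Chars.join, List.intercalate] at *
      simpa [List.intersperse] using ih

lemma str_join_append_singleton (p : List String) (w : String) :
    PySem.Str.join "" (p ++ [w]) = PySem.Str.join "" p ++ w := by
  simp [PySem.Str.join, chars_join_nil_eq_flatten, String.ofList_append]

lemma enumerate_eq_map_range (ws : List String) (s : Int) :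
    PySem.List.enumerate ws s =
      (List.range ws.length).map (fun (k : Nat) => (s + (k : Int), ws.getD k "")) := by
  induction ws generalizing s with
  | nil => simp [PySem.List.enumerate_nil]
  | cons a t ih =>
    rw [PySem.List.enumerate_cons, ih (s + 1)]
    simp only [List.length_cons, List.range_succ_eq_map, List.map_cons, List.map_map,
      Nat.cast_zero, add_zero, List.getD_cons_zero, List.cons.injEq,
      true_and]
    apply List.map_congr_left
    intro k _
    simp only [Function.comp_apply, Prod.mk.injEq]
    constructor
    · push_cast; ring
    · rfl

lemma words2strFunc_eq (n : Nat) : ∀ (suffix : List String), suffix.length = n →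
    ∀ (pre : List String) (res : PySem.Set String),
    words2strFunc res pre suffix =
      (allConcats suffix).foldl
        (fun r s => PySem.Set.add r (PySem.Str.join "" pre ++ s)) res := by
  induction n using Nat.strong_induction_on with
  | _ n ih =>
    intro suffix hlen pre res
    rw [words2strFunc, allConcats]
    by_cases hnil : suffix = []
    · subst hnil
      simp [List.foldl, String.append_empty]
    · simp only [if_neg hnil]
      rw [List.foldl_flatMap]
      rw [@List.foldl_attach _ _ (List.range suffix.length)
        (fun r i => words2strFunc r (pre ++ [PySem.List.pyGetD suffix (i : Int) ""])
          (PySem.List.slice suffix none (some (i : Int)) ++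
            PySem.List.slice suffix (some ((i : Int) + 1)) none)) res]
      rw [@List.foldl_attach _ _ (PySem.List.enumerate suffix)
        (fun r p => ((allConcats (PySem.List.slice suffix none (some p.1) ++
            PySem.List.slice suffix (some (p.1 + 1)) none)).map
              (fun tail => p.2 ++ tail)).foldl
            (fun r s => PySem.Set.add r (PySem.Str.join "" pre ++ s)) r) res]
      rw [enumerate_eq_map_range suffix 0, List.foldl_map]
      simp only [zero_add]
      apply PySem.List.foldl_congr_mem
      intro r k hk
      have hklt : k < suffix.length := List.mem_range.mp hk
      have hlt : (PySem.List.slice suffix none (some (k : Int)) ++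
          PySem.List.slice suffix (some ((k : Int) + 1)) none).length < n := by
        have h1 : ((k : Int) + 1) = ((k + 1 : Nat) : Int) := by push_cast; ring
        rw [h1, PySem.List.slice_to_natCast, PySem.List.slice_from_natCast]
        simp only [List.length_append, List.length_take, List.length_drop]
        omega
      rw [ih _ hlt _ rfl, List.foldl_map]
      simp only [PySem.List.pyGetD_natCast]
      apply PySem.List.foldl_congr_mem
      intro r' t _
      rw [str_join_append_singleton, String.append_assoc]

-- ===== VERDICT (by name: the statement is the Claim_ definition above) =====
theorem words2str_spec : Claim_equal_words2str := by
  intro words _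
  unfold Spec_words2str words2str words2str_alt
  rw [words2strFunc_eq words.length words rfl [] PySem.Set.empty]
  have h0 : ∀ s : String, PySem.Str.join "" [] ++ s = s := by
    intro s
    have : PySem.Str.join "" [] = "" := rfl
    rw [this, String.empty_append]
  simp only [h0]
  rw [PySem.Set.ofList_eq_foldl]
  rfl
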